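-- pv_equiv track=rewrite | github.com/siqiaof/CS61A-Spring-2018 | exam_prep/ep3.py | no_eleven
-- ===== SOURCE A (Python) =====
-- def no_eleven(n):
--     """Return a list of lists of 1's and 6's that do not
--     contain 1 after 1.
--     >>> no_eleven(2)
--     [[6, 6], [6, 1], [1, 6]]
--     >>> no_eleven(3)
--     [[6, 6, 6], [6, 6, 1], [6, 1, 6], [1, 6, 6], [1, 6, 1]]
--     >>> no_eleven(4)[:4] # first half
--     [[6, 6, 6, 6], [6, 6, 6, 1], [6, 6, 1, 6], [6, 1, 6, 6]]
--     >>> no_eleven(4)[4:] # second half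
--     [[6, 1, 6, 1], [1, 6, 6, 6], [1, 6, 6, 1], [1, 6, 1, 6]]
--     """
--     if n == 0:
--         return [[]]
--     elif n == 1:
--         return [[6], [1]]
--     else:
--         a, b = no_eleven(n - 1), no_eleven(n - 2)
--         return [[6]+s for s in a] + [[1, 6]+s for s in b]
-- ===== SOURCE B (Python) =====
-- def no_eleven(n):
--     """Single linear recursion: build level n from level n-1 alone by
--     extending each sequence at the tail by 6 and, when legal, by 1."""
--     if n == 0:
--         return [[]]
--     prev = no_eleven(n - 1)
--     return [s + [d] for s in prev for d in (6, 1)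
--             if d == 6 or not s or s[-1] != 1]
-- ===== Notes on version B (the rewrite author's own statement) =====
-- stated objective: faster
-- what changed: Replaced A's branching double recursion (which prepends prefixes and recomputes every level exponentially many times) by a single linear recursion that builds level n from level n-1 alone, extending each sequence at the tail by 6 and, when its last element is not 1, by 1, so each level is built exactly once.
import Mathlib
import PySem

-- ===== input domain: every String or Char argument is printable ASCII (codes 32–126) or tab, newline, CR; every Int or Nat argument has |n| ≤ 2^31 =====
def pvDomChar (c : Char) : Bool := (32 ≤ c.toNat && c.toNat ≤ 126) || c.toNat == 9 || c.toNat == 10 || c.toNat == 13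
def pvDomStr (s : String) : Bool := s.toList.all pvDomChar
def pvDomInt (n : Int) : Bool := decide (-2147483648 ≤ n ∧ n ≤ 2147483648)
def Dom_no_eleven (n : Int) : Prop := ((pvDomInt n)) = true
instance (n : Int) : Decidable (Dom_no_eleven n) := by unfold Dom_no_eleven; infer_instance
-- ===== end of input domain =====

-- B replaces A's fib-style double recursion (which recomputes each level exponentially often)
-- by a single linear recursion: level n is built from level n-1 alone, extending every sequence
-- at the tail by 6 and, when its last element is not 1, by 1 — asymptotically faster.

-- ===== PORT A =====
-- A's double recursion, on the nonnegative part of the domain (negative n: Python raises)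
def noElevenRecA : Nat → List (List Int)
  | 0 => [[]]
  | 1 => [[6], [1]]
  | (k+2) =>
    let a := noElevenRecA (k+1)
    let b := noElevenRecA k
    (a.map (fun s => 6 :: s)) ++ (b.map (fun s => 1 :: 6 :: s))

def no_eleven (n : Int) : List (List Int) := noElevenRecA n.toNat

-- ===== PORT B =====
-- one element of Source B's comprehension: the extensions of a single sequence s
-- (s[-1] on a nonempty s is its last element: getLast?)
def extendB (s : List Int) : List (List Int) :=
  (([6, 1] : List Int).filter
      (fun d => d == 6 || s.isEmpty || s.getLast? != some 1)).map
    (fun d => s ++ [d])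

-- the comprehension over all sequences of the previous level
def stepB (seqs : List (List Int)) : List (List Int) := seqs.flatMap extendB

-- Source B's recursion: level 0 is [[]]; level k+1 extends level k (negative n: Python raises)
def noElevenRecB : Nat → List (List Int)
  | 0 => [[]]
  | (k+1) => stepB (noElevenRecB k)

def no_eleven_alt (n : Int) : List (List Int) := noElevenRecB n.toNat

-- ===== PRECONDITION & SPEC =====
-- A raises RecursionError (returns no value) for negative n, so those inputs are excluded.
def Pre_no_eleven (n : Int) : Prop := 0 ≤ n
instance (n : Int) : Decidable (Pre_no_eleven n) := by unfold Pre_no_eleven; infer_instance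
def pvWitness_no_eleven : Int := 3

def Spec_no_eleven (n : Int) (out : List (List Int)) : Prop := out = no_eleven_alt n
instance (n : Int) (out : List (List Int)) : Decidable (Spec_no_eleven n out) := by unfold Spec_no_eleven; infer_instance

-- ===== CLAIM (what is proved, stated in full; the proofs are below) =====
def Claim_equal_no_eleven : Prop := ∀ (n : Int), Dom_no_eleven n → Pre_no_eleven n → Spec_no_eleven n (no_eleven n)

-- ===== LEMMAS AND PROOFS =====

-- extending a cons whose tail is nonempty ignores the head
theorem extendB_cons_ne (c : Int) (s : List Int) (h : s ≠ []) :
    extendB (c :: s) = (extendB s).map (fun t => c :: t) := by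
  cases s with
  | nil => exact absurd rfl h
  | cons a t =>
    unfold extendB
    rw [List.getLast?_cons_cons]
    simp [List.map_map, Function.comp]

-- extending after prepending a 6 commutes with prepending the 6
theorem extendB_six (s : List Int) :
    extendB (6 :: s) = (extendB s).map (fun t => 6 :: t) := by
  cases s with
  | nil => decide
  | cons a t => exact extendB_cons_ne 6 (a :: t) (by simp)

-- likewise for the [1, 6] prefix
theorem extendB_one_six (s : List Int) :
    extendB (1 :: 6 :: s) = (extendB s).map (fun t => 1 :: 6 :: t) := by
  rw [extendB_cons_ne 1 (6 :: s) (by simp), extendB_six, List.map_map]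
  rfl

theorem stepB_map_of_comm (g : List Int → List Int)
    (hg : ∀ s, extendB (g s) = (extendB s).map g) (xs : List (List Int)) :
    stepB (xs.map g) = (stepB xs).map g := by
  unfold stepB
  rw [List.flatMap_map, List.map_flatMap]
  exact List.flatMap_congr (fun s _ => hg s)

-- one pass of B advances A's recursion by one level
theorem stepB_level (k : Nat) : stepB (noElevenRecA k) = noElevenRecA (k + 1) := by
  induction k using Nat.strong_induction_on with
  | _ k ih =>
    match k with
    | 0 => decide
    | 1 => decide
    | (k+2) =>
      show stepB (noElevenRecA (k+2)) = noElevenRecA (k+3)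
      unfold noElevenRecA
      simp only [stepB, List.flatMap_append]
      rw [show ((noElevenRecA (k+1)).map (fun s => 6 :: s)).flatMap extendB
            = stepB ((noElevenRecA (k+1)).map (fun s => 6 :: s)) from rfl,
          show ((noElevenRecA k).map (fun s => 1 :: 6 :: s)).flatMap extendB
            = stepB ((noElevenRecA k).map (fun s => 1 :: 6 :: s)) from rfl,
          stepB_map_of_comm _ extendB_six, stepB_map_of_comm _ extendB_one_six,
          ih (k+1) (by omega), ih k (by omega)]

-- B's levels are A's levels
theorem recB_eq_recA (k : Nat) : noElevenRecB k = noElevenRecA k := by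
  induction k with
  | zero => rfl
  | succ k ih => rw [noElevenRecB, ih]; exact stepB_level k

-- ===== VERDICT (by name: the statement is the Claim_ definition above) =====
theorem no_eleven_spec : Claim_equal_no_eleven := by
  intro n _ _
  unfold Spec_no_eleven no_eleven no_eleven_alt
  exact (recB_eq_recA n.toNat).symm
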